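-- pv_equiv track=rewrite | github.com/Dreamwings/LeetCodeSol | 2297-amount-of-new-area-painted-each-day/amount-of-new-area-painted-each-day.py | amountPainted
-- ===== SOURCE A (Python) =====
-- from typing import List
--
-- def amountPainted(paint: List[List[int]]) -> List[int]:
--     import collections
--     import heapq
--
--     ## S1: Line Sweep, Heap
--     ## T: O(NlogN)
--     ## S: O(N)
--
--     points = collections.defaultdict(list)
--     for i, (s, e) in enumerate(paint):
--         points[s].append((True, i))
--         points[e].append((False, i))
--     min_heap = []
--     lookup = [False]*len(paint)
--     result = [0]*len(paint)
--     prev = -1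
--     for pos in sorted(points.keys()):
--         while min_heap and lookup[min_heap[0]]:
--             heapq.heappop(min_heap)
--         if min_heap:
--             result[min_heap[0]] += pos-prev
--         prev = pos
--         for t, i in points[pos]:
--             if t:
--                 heapq.heappush(min_heap, i)
--             else:
--                 lookup[i] = True
--     return result
--
--     """
--     ## S2:
--     ## T: O(NlogN)
--     ## S: O(N)
--
--     from sortedcontainers import SortedList
--
--     points = collections.defaultdict(list)
--     for i, (s, e) in enumerate(paint):
--         points[s].append((True, i))
--         points[e].append((False, i))
--     sl = SortedList()
--     result = [0]*len(paint)
--     prev = -1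
--     for pos in sorted(points.iterkeys()):
--         if sl:
--             result[sl[0]] += pos-prev
--         prev = pos
--         for t, i in points[pos]:
--             if t:
--                 sl.add(i)
--             else:
--                 sl.remove(i)
--     return result
--
--     ## S3:
--     ## https://github.com/kamyu104/LeetCode-Solutions/blob/master/Python/amount-of-new-area-painted-each-day.py
--     """
-- ===== SOURCE B (Python) =====
-- def amountPainted(paint):
--     # Coordinate-compressed segment scan: between each pair of adjacent event
--     # coordinates, the whole segment is painted by the first (lowest-index) day
--     # whose interval covers it; no heap, no per-position event lists.
--     xs = sorted({c for se in paint for c in se})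
--     result = [0] * len(paint)
--     for p, q in zip(xs, xs[1:]):
--         for i, (s, e) in enumerate(paint):
--             if s <= p and q <= e:
--                 result[i] += q - p
--                 break
--     return result
-- ===== Notes on version B (the rewrite author's own statement) =====
-- stated objective: alternative
-- what changed: A sweeps sorted event positions while maintaining a defaultdict of start/end events, a lazily-pruned min-heap of active day indices and a lookup table of finished days; B drops the heap and the event dict entirely: it compresses coordinates into sorted distinct endpoints and, for each adjacent segment, scans the days in index order crediting the segment to the first day covering it.
import Mathlib
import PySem

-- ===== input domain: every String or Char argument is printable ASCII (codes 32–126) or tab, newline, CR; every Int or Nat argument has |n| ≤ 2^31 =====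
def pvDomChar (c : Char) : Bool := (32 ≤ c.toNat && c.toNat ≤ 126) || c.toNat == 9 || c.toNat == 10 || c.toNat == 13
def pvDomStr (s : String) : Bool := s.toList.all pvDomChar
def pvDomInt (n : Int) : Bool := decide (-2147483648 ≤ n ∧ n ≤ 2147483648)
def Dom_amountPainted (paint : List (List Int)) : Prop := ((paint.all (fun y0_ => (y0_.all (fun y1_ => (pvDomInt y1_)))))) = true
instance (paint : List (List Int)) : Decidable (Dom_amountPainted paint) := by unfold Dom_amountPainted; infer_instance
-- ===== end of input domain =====

-- B replaces A's heap-driven line sweep by a coordinate-compressed segment scan (first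
-- covering day per segment); objective: alternative (no speed claim). Equivalence is on
-- the return value; neither program mutates its argument.

-- shared accessors: the tuple unpacking 's, e = row' of a length-2 row (exact under Pre_)
def sOf (se : List Int) : Int := PySem.List.pyGetD se 0 0
def eOf (se : List Int) : Int := PySem.List.pyGetD se 1 0

-- 'xs[i] = v' / 'xs[i] += v': in both programs the index is a valid non-negative index
-- (it is produced by enumerate), where List.set is exact Python list assignment.
def pySetAt {α : Type} (xs : List α) (i : Int) (v : α) : List α := xs.set i.toNat v
def pyAddAt (xs : List Int) (i : Int) (v : Int) : List Int :=
  pySetAt xs i (PySem.List.pyGetD xs i 0 + v)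

-- ===== PORT A =====
-- heapq min-heap modelled as the ASCENDING SORTED list of its elements: heap[0] (the
-- minimum) is the head, heappush inserts keeping order, heappop removes the head.
-- Exact for every heap operation A performs: A's heap holds distinct day indices, so
-- each heapq observable (heap[0], truthiness, pop order) is determined by the element set.
def heapPush (h : List Int) (x : Int) : List Int :=
  PySem.List.insertBy (fun a b => decide (a < b)) x h

-- 'while min_heap and lookup[min_heap[0]]: heapq.heappop(min_heap)'
def popStale (lookup : List Bool) : List Int → List Int
  | [] => []
  | j :: t => if PySem.List.pyGetD lookup j false then popStale lookup t else j :: t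

-- state (min_heap, lookup, result, prev)
def stepEvent (st : List Int × List Bool × List Int × Int) (ev : Bool × Int) :
    List Int × List Bool × List Int × Int :=
  if ev.1 then (heapPush st.1 ev.2, st.2.1, st.2.2.1, st.2.2.2)
  else (st.1, pySetAt st.2.1 ev.2 true, st.2.2.1, st.2.2.2)

def stepPos (points : PySem.Dict Int (List (Bool × Int)))
    (st : List Int × List Bool × List Int × Int) (pos : Int) :
    List Int × List Bool × List Int × Int :=
  let heap := popStale st.2.1 st.1
  let result := match heap with
    | [] => st.2.2.1
    | j :: _ => pyAddAt st.2.2.1 j (pos - st.2.2.2)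
  (points.getD pos []).foldl stepEvent (heap, st.2.1, result, pos)

def pointsOf (paint : List (List Int)) : PySem.Dict Int (List (Bool × Int)) :=
  (PySem.List.enumerate paint 0).foldl
    (fun d p =>
      (d.modify (sOf p.2) [] (fun l => l ++ [(true, p.1)])).modify
        (eOf p.2) [] (fun l => l ++ [(false, p.1)]))
    PySem.Dict.empty

def amountPainted (paint : List (List Int)) : List Int :=
  let points := pointsOf paint
  let st := (PySem.List.sorted points.keys (fun x => x) false).foldl (stepPos points)
      ([], List.replicate paint.length false, List.replicate paint.length 0, -1)
  st.2.2.1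

-- ===== PORT B =====
-- inner 'for i, (s, e) in enumerate(paint): if s <= p and q <= e: result[i] += q-p; break'
def scanDays : List (Int × List Int) → Int → Int → List Int → List Int
  | [], _, _, result => result
  | x :: rest, p, q, result =>
    if sOf x.2 ≤ p ∧ q ≤ eOf x.2 then pyAddAt result x.1 (q - p)
    else scanDays rest p q result

def amountPainted_alt (paint : List (List Int)) : List Int :=
  let xs := PySem.List.sorted (PySem.Set.ofList (paint.flatMap (fun se => se))) (fun x => x) false
  (xs.zip (PySem.List.slice xs (some 1) none)).foldl
    (fun result pq => scanDays (PySem.List.enumerate paint 0) pq.1 pq.2 result)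
    (List.replicate paint.length 0)

-- ===== PRECONDITION & SPEC =====
-- Pre_ admits exactly the rows Python A unpacks: 's, e = paint[i]' raises ValueError
-- unless every row has length exactly 2.
def Pre_amountPainted (paint : List (List Int)) : Prop := ∀ se ∈ paint, se.length = 2
instance (paint : List (List Int)) : Decidable (Pre_amountPainted paint) := by
  unfold Pre_amountPainted; infer_instance
def pvWitness_amountPainted : List (List Int) := [[1, 4], [2, 5], [5, 6]]
def Spec_amountPainted (paint : List (List Int)) (out : List Int) : Prop := out = amountPainted_alt paint
instance (paint : List (List Int)) (out : List Int) : Decidable (Spec_amountPainted paint out) := by unfold Spec_amountPainted; infer_instance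

-- ===== CLAIM (what is proved, stated in full; the proofs are below) =====
def Claim_equal_amountPainted : Prop := ∀ (paint : List (List Int)), Dom_amountPainted paint → Pre_amountPainted paint → Spec_amountPainted paint (amountPainted paint)

-- ===== LEMMAS AND PROOFS =====

-- row accessors by Nat index
def Sv (paint : List (List Int)) (i : Nat) : Int := sOf (paint.getD i [])
def Ev (paint : List (List Int)) (i : Nat) : Int := eOf (paint.getD i [])

-- the flattened event list A's dict is built from
def evs (paint : List (List Int)) : List (Int × (Bool × Int)) :=
  (PySem.List.enumerate paint 0).flatMap
    (fun x => [(sOf x.2, (true, x.1)), (eOf x.2, (false, x.1))])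

-- events at one position
def EA (paint : List (List Int)) (pos : Int) : List (Bool × Int) :=
  ((evs paint).filter (fun y => y.1 == pos)).map (fun y => y.2)

def posList (paint : List (List Int)) : List Int :=
  paint.flatMap (fun se => [sOf se, eOf se])

lemma foldl_two_modify (l : List (Int × List Int)) (d : PySem.Dict Int (List (Bool × Int))) :
    l.foldl (fun d p =>
      (d.modify (sOf p.2) [] (fun t => t ++ [(true, p.1)])).modify
        (eOf p.2) [] (fun t => t ++ [(false, p.1)])) d
    = (l.flatMap (fun x => [(sOf x.2, (true, x.1)), (eOf x.2, (false, x.1))])).foldl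
        (fun d p => d.modify p.1 [] (fun t => t ++ [p.2])) d := by
    induction l generalizing d with
  | nil => rfl
  | cons a l ih =>
    simp only [List.foldl_cons, List.flatMap_cons, List.cons_append, List.nil_append]
    rw [ih]

lemma pointsOf_getD (paint : List (List Int)) (pos : Int) :
    (pointsOf paint).getD pos [] = EA paint pos := by
  rw [pointsOf, foldl_two_modify, PySem.Dict.getD_foldl_modify_append]
  rfl

lemma pointsOf_keys (paint : List (List Int)) :
    (pointsOf paint).keys = PySem.Set.ofList ((evs paint).map (fun y => y.1)) := by
  rw [pointsOf, foldl_two_modify]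
  exact PySem.Dict.keys_foldl_modify_key (evs paint) (fun y => y.1) []
    (fun _ p t => t ++ [p.2]) PySem.Dict.empty

lemma evs_map_fst (paint : List (List Int)) :
    (evs paint).map (fun y => y.1) = posList paint := by
  unfold evs posList
  rw [List.map_flatMap]
  have h1 : (PySem.List.enumerate paint 0).flatMap
      (fun x => List.map (fun y => y.1) [(sOf x.2, (true, x.1)), (eOf x.2, (false, x.1))])
      = ((PySem.List.enumerate paint 0).map (fun x => x.2)).flatMap
          (fun se => [sOf se, eOf se]) := by
    rw [List.flatMap_map]
    rfl
  rw [h1, PySem.List.map_snd_enumerate]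

lemma posList_eq_flatten (paint : List (List Int)) (hpre : Pre_amountPainted paint) :
    posList paint = paint.flatMap (fun se => se) := by
  unfold posList
  apply List.flatMap_congr ?_
  intro se hse
  obtain ⟨a, b, rfl⟩ : ∃ a b, se = [a, b] := by
    have h2 := hpre se hse
    match se, h2 with
    | [a, b], _ => exact ⟨a, b, rfl⟩
  rfl

-- insertion into a strictly ascending list of a fresh element
lemma insertBy_lt_pairwise (x : Int) (h : List Int) (hs : h.Pairwise (· < ·)) (hx : x ∉ h) :
    (heapPush h x).Pairwise (· < ·) := by
  induction h with
  | nil => simp [heapPush, PySem.List.insertBy]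
  | cons y ys ih =>
    rw [heapPush, PySem.List.insertBy]
    have hxy : x ≠ y := fun h => hx (h ▸ List.mem_cons_self)
    have hys := List.pairwise_cons.mp hs
    split
    · rename_i hlt
      simp only [decide_eq_true_eq] at hlt
      refine List.pairwise_cons.mpr ⟨?_, hs⟩
      intro z hz
      rcases List.mem_cons.mp hz with rfl | hz
      · exact hlt
      · exact lt_trans hlt (hys.1 z hz)
    · rename_i hnlt
      simp only [decide_eq_true_eq] at hnlt
      have hyx : y < x := lt_of_le_of_ne (not_lt.mp hnlt) (Ne.symm hxy)
      refine List.pairwise_cons.mpr ⟨?_, ih hys.2 (fun h => hx (List.mem_cons_of_mem _ h))⟩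
      intro z hz
      rcases (PySem.List.mem_insertBy _ _ _ _).mp hz with rfl | hz
      · exact hyx
      · exact hys.1 z hz

lemma mem_heapPush (x y : Int) (h : List Int) : y ∈ heapPush h x ↔ y = x ∨ y ∈ h := by
  simpa [heapPush] using PySem.List.mem_insertBy (fun a b => decide (a < b)) x y h

lemma heapPushAll (l : List Int) (h : List Int) (hs : h.Pairwise (· < ·))
    (hfresh : ∀ j ∈ l, j ∉ h) (hnd : l.Nodup) :
    ((l.foldl heapPush h).Pairwise (· < ·)) ∧ (∀ j, j ∈ l.foldl heapPush h ↔ j ∈ l ∨ j ∈ h) := by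
  induction l generalizing h with
  | nil => exact ⟨hs, by simp⟩
  | cons a t ih =>
    have ha : a ∉ h := hfresh a (List.mem_cons_self)
    have hnd' := List.nodup_cons.mp hnd
    have hs' : (heapPush h a).Pairwise (· < ·) := insertBy_lt_pairwise a h hs ha
    have hfresh' : ∀ j ∈ t, j ∉ heapPush h a := by
      intro j hj hmem
      rcases (mem_heapPush a j h).mp hmem with rfl | hmem
      · exact hnd'.1 hj
      · exact hfresh j (List.mem_cons_of_mem _ hj) hmem
    obtain ⟨h1, h2⟩ := ih (heapPush h a) hs' hfresh' hnd'.2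
    refine ⟨h1, fun j => ?_⟩
    rw [List.foldl_cons] at *
    rw [h2 j, mem_heapPush]
    simp only [List.mem_cons]
    tauto

lemma popStale_suffix (lk : List Bool) (h : List Int) : (popStale lk h) <:+ h := by
  induction h with
  | nil => exact List.suffix_rfl
  | cons j t ih =>
    rw [popStale]
    split
    · exact ih.trans (List.suffix_cons _ _)
    · exact List.suffix_rfl

lemma mem_popStale (lk : List Bool) (h : List Int) (j : Int) (hj : j ∈ h)
    (hns : PySem.List.pyGetD lk j false = false) : j ∈ popStale lk h := by
  induction h with
  | nil => simp at hj
  | cons a t ih =>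
    rw [popStale]
    split
    · rename_i hst
      rcases List.mem_cons.mp hj with rfl | hj
      · rw [hns] at hst; exact absurd hst (by simp)
      · exact ih hj
    · exact hj

lemma popStale_head (lk : List Bool) (h : List Int) (j : Int) (t : List Int)
    (he : popStale lk h = j :: t) : PySem.List.pyGetD lk j false = false ∧ j ∈ h := by
  induction h with
  | nil => simp [popStale] at he
  | cons a t ih =>
    rw [popStale] at he
    split at he
    · obtain ⟨h1, h2⟩ := ih he
      exact ⟨h1, List.mem_cons_of_mem _ h2⟩
    · rename_i hst
      cases he
      exact ⟨Bool.eq_false_iff.mpr hst, List.mem_cons_self⟩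

lemma foldl_stepEvent (l : List (Bool × Int)) (h : List Int) (lk : List Bool)
    (res : List Int) (p : Int) :
    l.foldl stepEvent (h, lk, res, p)
    = ((l.filter (fun e => e.1)).foldl (fun h e => heapPush h e.2) h,
       (l.filter (fun e => !e.1)).foldl (fun lk e => pySetAt lk e.2 true) lk, res, p) := by
  induction l generalizing h lk with
  | nil => rfl
  | cons e t ih =>
    obtain ⟨b, i⟩ := e
    cases b <;> simp [stepEvent, ih]

lemma getD_foldl_setAt (l : List Int) (lk : List Bool)
    (hl : ∀ j ∈ l, 0 ≤ j ∧ j.toNat < lk.length) (i : Nat) :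
    (l.foldl (fun lk j => pySetAt lk j true) lk).getD i false
      = (lk.getD i false || decide ((i : Int) ∈ l)) := by
  induction l generalizing lk with
  | nil => simp
  | cons j t ih =>
    have hj := hl j List.mem_cons_self
    have hlen : (pySetAt lk j true).length = lk.length := by
      simp [pySetAt]
    rw [List.foldl_cons, ih (pySetAt lk j true)
      (fun a ha => by rw [hlen]; exact hl a (List.mem_cons_of_mem _ ha))]
    by_cases hij : (i : Int) = j
    · have hit : i = j.toNat := by omega
      subst hit
      simp [pySetAt, List.getD_eq_getElem?_getD, hj.2, hij]
    · have hne : j.toNat ≠ i := by omega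
      simp only [pySetAt, List.getD_eq_getElem?_getD, List.getElem?_set, if_neg hne,
        List.mem_cons, hij, false_or]


lemma length_foldl_setAt (l : List Int) (lk : List Bool) :
    (l.foldl (fun lk j => pySetAt lk j true) lk).length = lk.length := by
  induction l generalizing lk with
  | nil => rfl
  | cons j t ih => rw [List.foldl_cons, ih]; simp [pySetAt]

lemma mem_evs (paint : List (List Int)) (pos : Int) (t : Bool) (i : Int) :
    (pos, (t, i)) ∈ evs paint ↔
      ∃ k : Nat, k < paint.length ∧ i = (k : Int) ∧
        ((t = true ∧ Sv paint k = pos) ∨ (t = false ∧ Ev paint k = pos)) := by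
  unfold evs Sv Ev
  simp only [List.mem_flatMap, PySem.List.mem_enumerate_iff]
  constructor
  · rintro ⟨x, ⟨k, hk, rfl⟩, hx⟩
    simp only [List.mem_cons, List.not_mem_nil, or_false, Prod.mk.injEq] at hx
    refine ⟨k, hk, ?_⟩
    rcases hx with ⟨hs, ht, hi⟩ | ⟨hs, ht, hi⟩
    · exact ⟨by omega, Or.inl ⟨by simp_all, by rw [List.getD_eq_getElem _ _ hk]; omega⟩⟩
    · exact ⟨by omega, Or.inr ⟨by simp_all, by rw [List.getD_eq_getElem _ _ hk]; omega⟩⟩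
  · rintro ⟨k, hk, rfl, hcase⟩
    refine ⟨((k : Int), paint[k]), ⟨k, hk, by simp⟩, ?_⟩
    simp only [List.mem_cons, List.not_mem_nil, or_false, Prod.mk.injEq]
    rcases hcase with ⟨rfl, hs⟩ | ⟨rfl, hs⟩
    · exact Or.inl ⟨by rw [← hs, List.getD_eq_getElem _ _ hk], by simp⟩
    · exact Or.inr ⟨by rw [← hs, List.getD_eq_getElem _ _ hk], by simp⟩

lemma mem_EA (paint : List (List Int)) (pos : Int) (t : Bool) (i : Int) :
    (t, i) ∈ EA paint pos ↔ (pos, (t, i)) ∈ evs paint := by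
  constructor
  · intro h
    obtain ⟨y, hy, hy2⟩ := List.mem_map.mp h
    obtain ⟨hmem, hfst⟩ := List.mem_filter.mp hy
    obtain ⟨y1, y2⟩ := y
    obtain rfl : y1 = pos := by simpa using hfst
    cases hy2
    exact hmem
  · intro h
    exact List.mem_map.mpr ⟨(pos, (t, i)), List.mem_filter.mpr ⟨h, by simp⟩, rfl⟩

-- indices pushed at one position, and marked at one position
def trueIdx (paint : List (List Int)) (pos : Int) : List Int :=
  ((EA paint pos).filter (fun e => e.1)).map (fun e => e.2)
def falseIdx (paint : List (List Int)) (pos : Int) : List Int :=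
  ((EA paint pos).filter (fun e => !e.1)).map (fun e => e.2)

lemma mem_trueIdx (paint : List (List Int)) (pos : Int) (i : Int) :
    i ∈ trueIdx paint pos ↔ ∃ k : Nat, k < paint.length ∧ i = (k : Int) ∧ Sv paint k = pos := by
  unfold trueIdx
  simp only [List.mem_map, List.mem_filter]
  constructor
  · rintro ⟨⟨b, j⟩, ⟨hmem, hb⟩, rfl⟩
    simp only at hb
    subst hb
    rcases (mem_evs paint pos true j).mp ((mem_EA paint pos true j).mp hmem) with
      ⟨k, hk, rfl, ⟨_, hs⟩ | ⟨hf, _⟩⟩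
    · exact ⟨k, hk, rfl, hs⟩
    · exact absurd hf (by simp)
  · rintro ⟨k, hk, rfl, hs⟩
    exact ⟨(true, (k : Int)), ⟨(mem_EA paint pos true k).mpr
      ((mem_evs paint pos true k).mpr ⟨k, hk, rfl, Or.inl ⟨rfl, hs⟩⟩), rfl⟩, rfl⟩

lemma mem_falseIdx (paint : List (List Int)) (pos : Int) (i : Int) :
    i ∈ falseIdx paint pos ↔ ∃ k : Nat, k < paint.length ∧ i = (k : Int) ∧ Ev paint k = pos := by
  unfold falseIdx
  simp only [List.mem_map, List.mem_filter]
  constructor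
  · rintro ⟨⟨b, j⟩, ⟨hmem, hb⟩, rfl⟩
    obtain rfl : b = false := by simpa using hb
    rcases (mem_evs paint pos false j).mp ((mem_EA paint pos false j).mp hmem) with
      ⟨k, hk, rfl, ⟨ht, _⟩ | ⟨_, he⟩⟩
    · exact absurd ht (by simp)
    · exact ⟨k, hk, rfl, he⟩
  · rintro ⟨k, hk, rfl, he⟩
    exact ⟨(false, (k : Int)), ⟨(mem_EA paint pos false k).mpr
      ((mem_evs paint pos false k).mpr ⟨k, hk, rfl, Or.inr ⟨rfl, he⟩⟩), rfl⟩, rfl⟩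

lemma nodup_trueIdx (paint : List (List Int)) (pos : Int) : (trueIdx paint pos).Nodup := by
  have haux : ∀ l : List (Int × List Int),
      (((((l.flatMap (fun x => [(sOf x.2, (true, x.1)), (eOf x.2, (false, x.1))])).filter
          (fun y => y.1 == pos)).map (fun y => y.2)).filter (fun e => e.1)).map (fun e => e.2)).Sublist
        (l.map (fun x => x.1)) := by
    intro l
    induction l with
    | nil => simp
    | cons a t ih =>
      simp only [List.flatMap_cons]
      by_cases hs : sOf a.2 == pos <;> by_cases he : eOf a.2 == pos <;>
        simp only [List.filter_cons, hs, he, Bool.false_eq_true, if_false, if_true,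
          List.map_cons, List.cons_append, List.nil_append] <;>
        first
          | exact List.Sublist.cons₂ _ ih
          | exact List.Sublist.cons _ ih
  have hnd : ((PySem.List.enumerate paint 0).map (fun x => x.1)).Nodup := by
    rw [PySem.List.map_fst_enumerate]
    exact PySem.List.nodup_pyRange_one _ _
  exact (haux (PySem.List.enumerate paint 0)).nodup hnd

lemma scan_none (l : List (Int × List Int)) (p q : Int) (res : List Int)
    (h : ∀ x ∈ l, ¬(sOf x.2 ≤ p ∧ q ≤ eOf x.2)) : scanDays l p q res = res := by
  induction l with
  | nil => rfl
  | cons x t ih =>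
    rw [scanDays]
    rw [if_neg (h x List.mem_cons_self)]
    exact ih (fun y hy => h y (List.mem_cons_of_mem _ hy))

lemma scan_found (l₁ l₂ : List (Int × List Int)) (x : Int × List Int) (p q : Int) (res : List Int)
    (h1 : ∀ y ∈ l₁, ¬(sOf y.2 ≤ p ∧ q ≤ eOf y.2)) (hx : sOf x.2 ≤ p ∧ q ≤ eOf x.2) :
    scanDays (l₁ ++ x :: l₂) p q res = pyAddAt res x.1 (q - p) := by
  induction l₁ with
  | nil => rw [List.nil_append, scanDays, if_pos hx]
  | cons y t ih =>
    rw [List.cons_append, scanDays, if_neg (h1 y List.mem_cons_self)]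
    exact ih (fun z hz => h1 z (List.mem_cons_of_mem _ hz))

lemma mem_posList (paint : List (List Int)) (i : Nat) (hi : i < paint.length) :
    Sv paint i ∈ posList paint ∧ Ev paint i ∈ posList paint := by
  have hmem : paint.getD i [] ∈ paint := by
    rw [List.getD_eq_getElem _ _ hi]
    exact List.getElem_mem hi
  unfold posList Sv Ev
  exact ⟨List.mem_flatMap.mpr ⟨_, hmem, by simp⟩, List.mem_flatMap.mpr ⟨_, hmem, by simp⟩⟩

-- the main sweep invariant: from a state reached after processing all positions ≤ p,
-- A's remaining fold produces exactly B's fold over the remaining segments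
lemma sweep (paint : List (List Int)) (Q : List Int) (p : Int)
    (h : List Int) (lk : List Bool) (res : List Int)
    (hQs : Q.Pairwise (· < ·)) (hQgt : ∀ x ∈ Q, p < x)
    (hcovS : ∀ i : Nat, i < paint.length → Sv paint i ≤ p ∨ Sv paint i ∈ Q)
    (hcovE : ∀ i : Nat, i < paint.length → Ev paint i ≤ p ∨ Ev paint i ∈ Q)
    (hlkLen : lk.length = paint.length)
    (hlk : ∀ i : Nat, i < paint.length → lk.getD i false = decide (Ev paint i ≤ p))
    (hhs : h.Pairwise (· < ·))
    (hhm : ∀ j ∈ h, ∃ i : Nat, i < paint.length ∧ j = (i : Int) ∧ Sv paint i ≤ p)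
    (hact : ∀ i : Nat, i < paint.length → Sv paint i ≤ p → p < Ev paint i → (i : Int) ∈ h) :
    (Q.foldl (stepPos (pointsOf paint)) (h, lk, res, p)).2.2.1
    = ((p :: Q).zip Q).foldl
        (fun res pq => scanDays (PySem.List.enumerate paint 0) pq.1 pq.2 res) res := by
  induction Q generalizing p h lk res with
  | nil => rfl
  | cons q Q' ih =>
    have hpc := List.pairwise_cons.mp hQs
    have hpq : p < q := hQgt q List.mem_cons_self
    -- one step of A
    have hstep : stepPos (pointsOf paint) (h, lk, res, p) q
        = ((trueIdx paint q).foldl heapPush (popStale lk h),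
           (falseIdx paint q).foldl (fun lk j => pySetAt lk j true) lk,
           (match popStale lk h with
            | [] => res
            | j :: _ => pyAddAt res j (q - p)), q) := by
      show ((pointsOf paint).getD q []).foldl stepEvent
          (popStale lk h, lk,
           (match popStale lk h with
            | [] => res
            | j :: _ => pyAddAt res j (q - p)), q) = _
      rw [pointsOf_getD, foldl_stepEvent]
      unfold trueIdx falseIdx
      rw [List.foldl_map, List.foldl_map]
    -- the credited update of this step equals B's scan over the segment (p, q)
    have hres : (match popStale lk h with
            | [] => res
            | j :: _ => pyAddAt res j (q - p))
        = scanDays (PySem.List.enumerate paint 0) p q res := by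
      by_cases hex : ∃ i : Nat, i < paint.length ∧ Sv paint i ≤ p ∧ p < Ev paint i
      · have hspec := Nat.find_spec hex
        set m := Nat.find hex with hm
        have hmh : ((m : Nat) : Int) ∈ h := hact _ hspec.1 hspec.2.1 hspec.2.2
        have hstale : PySem.List.pyGetD lk ((m : Nat) : Int) false = false := by
          rw [PySem.List.pyGetD_natCast, hlk _ hspec.1]
          simp only [decide_eq_false_iff_not, not_le]
          exact hspec.2.2
        have hmem1 : ((m : Nat) : Int) ∈ popStale lk h := mem_popStale _ _ _ hmh hstale
        obtain ⟨j, t, hjt⟩ : ∃ j t, popStale lk h = j :: t := by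
          cases hps : popStale lk h with
          | nil => rw [hps] at hmem1; simp at hmem1
          | cons a b => exact ⟨a, b, rfl⟩
        obtain ⟨hjns, hjh⟩ := popStale_head lk h j t hjt
        obtain ⟨i0, hi0, rfl, hsi0⟩ := hhm j hjh
        have hact0 : p < Ev paint i0 := by
          rw [PySem.List.pyGetD_natCast, hlk _ hi0] at hjns
          simpa using hjns
        have hm_le : m ≤ i0 := Nat.find_min' hex ⟨hi0, hsi0, hact0⟩
        have hpair : (popStale lk h).Pairwise (· < ·) :=
          hhs.sublist (popStale_suffix lk h).sublist
        have hj_eq : i0 = m := by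
          rw [hjt] at hmem1
          rcases List.mem_cons.mp hmem1 with hmm | hmm
          · omega
          · rw [hjt] at hpair
            have := (List.pairwise_cons.mp hpair).1 _ hmm
            omega
        -- B finds the same day
        have hq_le : q ≤ Ev paint i0 := by
          rcases hcovE i0 hi0 with h' | h'
          · omega
          · rcases List.mem_cons.mp h' with h'' | h''
            · omega
            · have := hpc.1 _ h''; omega
        have hdec : PySem.List.enumerate paint 0
            = PySem.List.enumerate (paint.take i0) 0 ++
              ((i0 : Int), paint[i0]'hi0) :: PySem.List.enumerate (paint.drop (i0 + 1)) ((i0 : Int) + 1) := by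
          conv_lhs => rw [← List.take_append_drop i0 paint]
          rw [PySem.List.enumerate_append, List.drop_eq_getElem_cons hi0,
            PySem.List.enumerate_cons]
          have hlt : (paint.take i0).length = i0 := by
            simp [List.length_take]; omega
          rw [hlt]
          norm_num
        have hscan : scanDays (PySem.List.enumerate paint 0) p q res
            = pyAddAt res ((i0 : Nat) : Int) (q - p) := by
          rw [hdec]
          refine scan_found _ _ _ _ _ _ ?_ ?_
          · rintro y hy ⟨hcs, hce⟩
            obtain ⟨k, hk, rfl⟩ := (PySem.List.mem_enumerate_iff _ _ _).mp hy
            have hk' : k < i0 := by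
              have := List.length_take_le i0 paint
              simp [List.length_take] at hk
              omega
            have hkp : k < paint.length := by omega
            have hget : (paint.take i0)[k] = paint[k]'hkp := List.getElem_take
            apply Nat.find_min hex (show k < Nat.find hex by omega)
            refine ⟨hkp, ?_, ?_⟩
            · unfold Sv sOf
              rw [List.getD_eq_getElem _ _ hkp, ← hget]
              exact hcs
            · have : q ≤ Ev paint k := by
                unfold Ev eOf
                rw [List.getD_eq_getElem _ _ hkp, ← hget]
                exact hce
              omega
          · constructor
            · show sOf (paint[i0]'hi0) ≤ p
              have : Sv paint i0 = sOf (paint[i0]'hi0) := by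
                unfold Sv; rw [List.getD_eq_getElem _ _ hi0]
              omega
            · show q ≤ eOf (paint[i0]'hi0)
              have : Ev paint i0 = eOf (paint[i0]'hi0) := by
                unfold Ev; rw [List.getD_eq_getElem _ _ hi0]
              omega
        rw [hjt, hscan]
      · -- no active day: A credits nothing, B finds no covering day
        have hps : popStale lk h = [] := by
          cases hps : popStale lk h with
          | nil => rfl
          | cons a b =>
            obtain ⟨hns, hah⟩ := popStale_head lk h a b hps
            obtain ⟨i0, hi0, rfl, hsi0⟩ := hhm a hah
            rw [PySem.List.pyGetD_natCast, hlk _ hi0] at hns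
            simp only [decide_eq_false_iff_not, not_le] at hns
            exact absurd ⟨i0, hi0, hsi0, hns⟩ hex
        rw [hps, scan_none]
        rintro y hy ⟨hcs, hce⟩
        obtain ⟨k, hk, rfl⟩ := (PySem.List.mem_enumerate_iff _ _ _).mp hy
        apply hex
        refine ⟨k, hk, ?_, ?_⟩
        · unfold Sv
          rw [List.getD_eq_getElem _ _ hk]
          exact hcs
        · have : q ≤ Ev paint k := by
            unfold Ev
            rw [List.getD_eq_getElem _ _ hk]
            exact hce
          omega
    -- heap facts for the new state
    have hs1 : (popStale lk h).Pairwise (· < ·) :=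
      hhs.sublist (popStale_suffix lk h).sublist
    have hfresh : ∀ j ∈ trueIdx paint q, j ∉ popStale lk h := by
      intro j hj hmem
      obtain ⟨k, hk, rfl, hsq⟩ := (mem_trueIdx paint q _).mp hj
      have hjh : ((k : Nat) : Int) ∈ h := (popStale_suffix lk h).sublist.subset hmem
      obtain ⟨i1, hi1, heq, hsi1⟩ := hhm _ hjh
      have hki : k = i1 := by omega
      subst hki
      omega
    obtain ⟨hhs2, hmem2⟩ :=
      heapPushAll (trueIdx paint q) (popStale lk h) hs1 hfresh (nodup_trueIdx paint q)
    have hfm : ∀ j ∈ falseIdx paint q, 0 ≤ j ∧ j.toNat < lk.length := by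
      intro j hj
      obtain ⟨k, hk, rfl, _⟩ := (mem_falseIdx paint q _).mp hj
      constructor
      · omega
      · rw [hlkLen]; omega
    -- assemble: rewrite one step on each side, then apply the induction hypothesis
    rw [List.foldl_cons, hstep, hres, List.zip_cons_cons, List.foldl_cons]
    refine ih q _ _ _ hpc.2 (fun x hx => hpc.1 x hx) ?_ ?_ ?_ ?_ hhs2 ?_ ?_
    · intro i hi
      rcases hcovS i hi with h' | h'
      · exact Or.inl (by omega)
      · rcases List.mem_cons.mp h' with h'' | h''
        · exact Or.inl (by omega)
        · exact Or.inr h''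
    · intro i hi
      rcases hcovE i hi with h' | h'
      · exact Or.inl (by omega)
      · rcases List.mem_cons.mp h' with h'' | h''
        · exact Or.inl (by omega)
        · exact Or.inr h''
    · rw [length_foldl_setAt]; exact hlkLen
    · intro i hi
      rw [getD_foldl_setAt _ _ hfm i, hlk i hi, ← Bool.decide_or, decide_eq_decide]
      have hmemiff : ((i : Nat) : Int) ∈ falseIdx paint q ↔ Ev paint i = q := by
        rw [mem_falseIdx]
        constructor
        · rintro ⟨k, hk, hik, he⟩
          have : i = k := by omega
          subst this
          exact he
        · intro he
          exact ⟨i, hi, rfl, he⟩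
      rw [hmemiff]
      constructor
      · rintro (h' | h') <;> omega
      · intro h'
        rcases hcovE i hi with h'' | h''
        · exact Or.inl h''
        · rcases List.mem_cons.mp h'' with h3 | h3
          · exact Or.inr h3
          · have := hpc.1 _ h3; omega
    · intro j hj
      rcases (hmem2 j).mp hj with h' | h'
      · obtain ⟨k, hk, rfl, hsq⟩ := (mem_trueIdx paint q _).mp h'
        exact ⟨k, hk, rfl, by omega⟩
      · obtain ⟨i1, hi1, rfl, hsi1⟩ := hhm _ ((popStale_suffix lk h).sublist.subset h')
        exact ⟨i1, hi1, rfl, by omega⟩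
    · intro i hi hsq hqe
      by_cases hsp : Sv paint i ≤ p
      · have hmemh : ((i : Nat) : Int) ∈ h := hact i hi hsp (by omega)
        have hns : PySem.List.pyGetD lk ((i : Nat) : Int) false = false := by
          rw [PySem.List.pyGetD_natCast, hlk _ hi]
          simp only [decide_eq_false_iff_not, not_le]
          omega
        exact (hmem2 _).mpr (Or.inr (mem_popStale _ _ _ hmemh hns))
      · rcases hcovS i hi with h' | h'
        · exact absurd h' hsp
        · rcases List.mem_cons.mp h' with h'' | h''
          · exact (hmem2 _).mpr (Or.inl ((mem_trueIdx paint q _).mpr ⟨i, hi, rfl, h''⟩))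
          · have := hpc.1 _ h''; omega

-- ===== VERDICT (by name: the statement is the Claim_ definition above) =====
theorem amountPainted_spec : Claim_equal_amountPainted := by
  intro paint hdom hpre
  show amountPainted paint = amountPainted_alt paint
  have hkeys : (pointsOf paint).keys = PySem.Set.ofList (paint.flatMap (fun se => se)) := by
    rw [pointsOf_keys, evs_map_fst, posList_eq_flatten paint hpre]
  have hA : amountPainted paint
      = ((PySem.List.sorted (PySem.Set.ofList (paint.flatMap (fun se => se))) (fun x => x) false).foldl
          (stepPos (pointsOf paint))
          ([], List.replicate paint.length false, List.replicate paint.length 0, -1)).2.2.1 := by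
    rw [amountPainted, hkeys]
  have hB : amountPainted_alt paint
      = ((PySem.List.sorted (PySem.Set.ofList (paint.flatMap (fun se => se))) (fun x => x) false).zip
          (PySem.List.sorted (PySem.Set.ofList (paint.flatMap (fun se => se))) (fun x => x) false).tail).foldl
          (fun result pq => scanDays (PySem.List.enumerate paint 0) pq.1 pq.2 result)
          (List.replicate paint.length 0) := by
    rw [amountPainted_alt, PySem.List.slice_from_one]
  rw [hA, hB]
  have hP : (PySem.List.sorted (PySem.Set.ofList (paint.flatMap (fun se => se))) (fun x => x) false).Pairwise (· < ·) :=
    PySem.List.sorted_ofList_pairwise_lt _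
  have hmemP : ∀ x, x ∈ PySem.List.sorted (PySem.Set.ofList (paint.flatMap (fun se => se))) (fun x => x) false
      ↔ x ∈ posList paint := by
    intro x
    rw [PySem.List.mem_sorted, PySem.Set.mem_ofList, posList_eq_flatten paint hpre]
  cases hPc : PySem.List.sorted (PySem.Set.ofList (paint.flatMap (fun se => se))) (fun x => x) false with
  | nil => rfl
  | cons p0 Q =>
    rw [hPc] at hP hmemP
    have hpc0 := List.pairwise_cons.mp hP
    have hmin : ∀ x ∈ posList paint, p0 ≤ x := by
      intro x hx
      rcases List.mem_cons.mp ((hmemP x).mpr hx) with rfl | hxx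
      · exact le_refl _
      · exact le_of_lt (hpc0.1 x hxx)
    -- the first iteration: empty heap, nothing credited, events at p0 processed
    have hstep0 : stepPos (pointsOf paint)
        ([], List.replicate paint.length false, List.replicate paint.length 0, -1) p0
        = ((trueIdx paint p0).foldl heapPush [],
           (falseIdx paint p0).foldl (fun lk j => pySetAt lk j true) (List.replicate paint.length false),
           List.replicate paint.length 0, p0) := by
      show ((pointsOf paint).getD p0 []).foldl stepEvent
          ([], List.replicate paint.length false, List.replicate paint.length 0, p0) = _
      rw [pointsOf_getD, foldl_stepEvent]
      unfold trueIdx falseIdx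
      rw [List.foldl_map, List.foldl_map]
    have hfm : ∀ j ∈ falseIdx paint p0, 0 ≤ j ∧ j.toNat < (List.replicate paint.length false).length := by
      intro j hj
      obtain ⟨k, hk, rfl, _⟩ := (mem_falseIdx paint p0 _).mp hj
      constructor
      · omega
      · rw [List.length_replicate]; omega
    obtain ⟨hhs2, hmem2⟩ :=
      heapPushAll (trueIdx paint p0) [] List.Pairwise.nil (by simp) (nodup_trueIdx paint p0)
    rw [List.foldl_cons, hstep0, List.tail_cons]
    refine sweep paint Q p0 _ _ _ hpc0.2 (fun x hx => hpc0.1 x hx) ?_ ?_ ?_ ?_ hhs2 ?_ ?_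
    · intro i hi
      rcases List.mem_cons.mp ((hmemP _).mpr (mem_posList paint i hi).1) with h' | h'
      · exact Or.inl (le_of_eq h')
      · exact Or.inr h'
    · intro i hi
      rcases List.mem_cons.mp ((hmemP _).mpr (mem_posList paint i hi).2) with h' | h'
      · exact Or.inl (le_of_eq h')
      · exact Or.inr h'
    · rw [length_foldl_setAt, List.length_replicate]
    · intro i hi
      rw [getD_foldl_setAt _ _ hfm i, List.getD_replicate _ hi, Bool.false_or, decide_eq_decide]
      have hmemiff : ((i : Nat) : Int) ∈ falseIdx paint p0 ↔ Ev paint i = p0 := by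
        rw [mem_falseIdx]
        constructor
        · rintro ⟨k, hk, hik, he⟩
          have : i = k := by omega
          subst this
          exact he
        · intro he
          exact ⟨i, hi, rfl, he⟩
      rw [hmemiff]
      have := hmin _ (mem_posList paint i hi).2
      constructor
      · intro h'; omega
      · intro h'; omega
    · intro j hj
      rcases (hmem2 j).mp hj with h' | h'
      · obtain ⟨k, hk, rfl, hsq⟩ := (mem_trueIdx paint p0 _).mp h'
        exact ⟨k, hk, rfl, le_of_eq hsq⟩
      · simp at h'
    · intro i hi hsq _
      have := hmin _ (mem_posList paint i hi).1
      exact (hmem2 _).mpr (Or.inl ((mem_trueIdx paint p0 _).mpr ⟨i, hi, rfl, by omega⟩))
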